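-- pv_equiv track=rewrite | github.com/samuelwford/adventofcode | 2023/day_01.py | p1_parse
-- ===== SOURCE A (Python) =====
-- def p1_parse(i):
-- 	def get_calibration_value(line):
-- 		reversed_line = line[::-1]
-- 		start = -1
-- 		end = -1
-- 		current = 0
-- 		while start < 0 or end < 0: #current < len(line):
-- 			if start < 0:
-- 				if line[current].isdigit():
-- 					start = int(line[current])
-- 			if end < 0:
-- 				if reversed_line[current].isdigit():
-- 					end = int(reversed_line[current])
-- 			current = current + 1
-- 		return int(str(start) + str(end))
--
-- 	return [get_calibration_value(j) for j in i]
-- ===== SOURCE B (Python) =====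
-- def p1_parse(i):
-- 	def get_calibration_value(line):
-- 		digits = [c for c in line if c.isdigit()]
-- 		return int(digits[0] + digits[-1])
--
-- 	return [get_calibration_value(j) for j in i]
-- ===== Notes on version B (the rewrite author's own statement) =====
-- stated objective: simpler
-- what changed: Replaces the two-pointer simultaneous front/back while-loop over the line and its reversed copy with a single forward pass collecting all digit characters, then indexing the first and last of that list.
import Mathlib
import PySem

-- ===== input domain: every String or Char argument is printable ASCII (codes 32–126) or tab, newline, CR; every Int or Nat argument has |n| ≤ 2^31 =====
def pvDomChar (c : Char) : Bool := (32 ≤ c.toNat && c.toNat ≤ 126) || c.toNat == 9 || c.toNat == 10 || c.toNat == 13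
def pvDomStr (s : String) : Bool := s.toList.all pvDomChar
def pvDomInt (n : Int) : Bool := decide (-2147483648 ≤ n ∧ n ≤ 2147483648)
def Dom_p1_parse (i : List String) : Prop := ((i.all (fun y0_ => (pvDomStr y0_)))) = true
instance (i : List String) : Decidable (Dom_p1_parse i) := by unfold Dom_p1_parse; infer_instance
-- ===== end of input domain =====

-- B replaces A's two-pointer front/back while-loop with collect-all-digits-then-index (simpler decomposition, same behaviour).


-- ===== PORT A =====
-- int(c) for a one-character string c; only reached under an isdigit test, where ofStr? is some
def pvIntOfChar (c : Char) : Int := (PySem.Int.ofStr? (String.ofList [c])).getD 0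

-- one 'if v < 0: if xs[i].isdigit(): v = int(xs[i])' step; none = IndexError
def pvStep (xs : List Char) (v i : Int) : Option Int :=
  if v < 0 then
    match PySem.List.pyGet? xs i with
    | none => none
    | some c => some (if PySem.Chars.isdigit c then pvIntOfChar c else v)
  else some v

-- the while-loop of get_calibration_value; fuel = len(line)+1 bounds the iterations the loop can make before both raising accesses
def pvLoop (line rev : List Char) : Int → Int → Int → Nat → Option Int
  | _, _, _, 0 => none
  | s, e, cur, fuel+1 =>
    if s < 0 ∨ e < 0 then
      match pvStep line s cur, pvStep rev e cur with
      | some s', some e' => pvLoop line rev s' e' (cur + 1) fuel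
      | _, _ => none
    else some ((PySem.Int.ofStr? (PySem.Int.toStr s ++ PySem.Int.toStr e)).getD 0)

def p1_parse (i : List String) : List Int :=
  i.map fun j =>
    let line := j.toList
    let rev := (PySem.List.slice? line none none (-1)).getD []
    (pvLoop line rev (-1) (-1) 0 (line.length + 1)).getD 0

-- ===== PORT B =====
def p1_parse_alt (i : List String) : List Int :=
  i.map fun j =>
    let digits := j.toList.filter PySem.Chars.isdigit
    match PySem.List.pyGet? digits 0, PySem.List.pyGet? digits (-1) with
    | some a, some b => (PySem.Int.ofStr? (String.ofList [a, b])).getD 0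
    | _, _ => 0

-- ===== PRECONDITION & SPEC =====
-- Pre_ excludes lines containing no digit character: there A (and B) raise IndexError.
def Pre_p1_parse (i : List String) : Prop :=
  ∀ j ∈ i, j.toList.any PySem.Chars.isdigit = true
instance (i : List String) : Decidable (Pre_p1_parse i) := by unfold Pre_p1_parse; infer_instance
def pvWitness_p1_parse : List String := (["1abc2", "7"])

def Spec_p1_parse (i : List String) (out : List Int) : Prop := out = p1_parse_alt i
instance (i : List String) (out : List Int) : Decidable (Spec_p1_parse i out) := by unfold Spec_p1_parse; infer_instance

-- ===== CLAIM (what is proved, stated in full; the proofs are below) =====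
def Claim_equal_p1_parse : Prop := ∀ (i : List String), Dom_p1_parse i → Pre_p1_parse i → Spec_p1_parse i (p1_parse i)

-- ===== LEMMAS AND PROOFS =====

-- the value A's loop resolves a still-unset pointer to, scanning xs forward
def pvFirstDig (xs : List Char) : Int := pvIntOfChar ((xs.find? PySem.Chars.isdigit).getD '0')

lemma pvDigit_cases (c : Char) (h : PySem.Chars.isdigit c = true) :
    c ∈ ['0','1','2','3','4','5','6','7','8','9'] := by
  simp [PySem.Chars.isdigit, Char.le_def, UInt32.le_iff_toBitVec_le, BitVec.le_def] at h
  have hv : c.val.toBitVec.toNat = c.toNat := rfl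
  have : c.toNat = 48 ∨ c.toNat = 49 ∨ c.toNat = 50 ∨ c.toNat = 51 ∨ c.toNat = 52 ∨
      c.toNat = 53 ∨ c.toNat = 54 ∨ c.toNat = 55 ∨ c.toNat = 56 ∨ c.toNat = 57 := by omega
  rcases this with h|h|h|h|h|h|h|h|h|h <;>
    · have := Char.ofNat_toNat c; rw [h] at this; simp [← this]

lemma pvIntOfChar_nonneg (c : Char) (h : PySem.Chars.isdigit c = true) : 0 ≤ pvIntOfChar c := by
  have := pvDigit_cases c h; fin_cases this <;> decide

lemma pvCombine (c d : Char) (hc : PySem.Chars.isdigit c = true) (hd : PySem.Chars.isdigit d = true) :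
    PySem.Int.ofStr? (PySem.Int.toStr (pvIntOfChar c) ++ PySem.Int.toStr (pvIntOfChar d)) =
      PySem.Int.ofStr? (String.ofList [c, d]) := by
  have h1 := pvDigit_cases c hc; have h2 := pvDigit_cases d hd
  fin_cases h1 <;> fin_cases h2 <;> decide

lemma pvLoop_eq (l r : List Char) (hlen : l.length = r.length) :
    ∀ (fuel n : Nat) (s e : Int), fuel + n = l.length + 1 → n ≤ l.length →
    (s < 0 → (l.drop n).any PySem.Chars.isdigit = true) →
    (e < 0 → (r.drop n).any PySem.Chars.isdigit = true) →
    pvLoop l r s e (n : Int) fuel =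
      some ((PySem.Int.ofStr?
          (PySem.Int.toStr (if s < 0 then pvFirstDig (l.drop n) else s) ++
           PySem.Int.toStr (if e < 0 then pvFirstDig (r.drop n) else e))).getD 0) := by
  intro fuel
  induction fuel with
  | zero => intro n s e hfn hn hs he; omega
  | succ fuel ih =>
    intro n s e hfn hn hs he
    by_cases hcond : s < 0 ∨ e < 0
    · have hnl : n < l.length := by
        rcases hcond with h | h
        · have h1 := hs h
          have h2 : l.drop n ≠ [] := by intro hnil; rw [hnil] at h1; simp at h1
          have h3 := List.length_drop (l := l) (i := n)
          have h4 : (l.drop n).length ≠ 0 := fun h0 => h2 (List.eq_nil_of_length_eq_zero h0)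
          omega
        · have h1 := he h
          have h2 : r.drop n ≠ [] := by intro hnil; rw [hnil] at h1; simp at h1
          have h3 := List.length_drop (l := r) (i := n)
          have h4 : (r.drop n).length ≠ 0 := fun h0 => h2 (List.eq_nil_of_length_eq_zero h0)
          omega
      have hnr : n < r.length := by omega
      have hstep : ∀ (xs : List Char) (v : Int) (h : n < xs.length),
          pvStep xs v (n : Int) =
            some (if v < 0 then (if PySem.Chars.isdigit xs[n] then pvIntOfChar xs[n] else v) else v) := by
        intro xs v h
        by_cases hv : v < 0 <;>
          simp [pvStep, hv, PySem.List.pyGet?_natCast, List.getElem?_eq_getElem h]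
      have hdl := List.drop_eq_getElem_cons hnl
      have hdr := List.drop_eq_getElem_cons hnr
      have hrec : pvLoop l r s e (n : Int) (fuel + 1) =
          pvLoop l r (if s < 0 then (if PySem.Chars.isdigit l[n] then pvIntOfChar l[n] else s) else s)
            (if e < 0 then (if PySem.Chars.isdigit r[n] then pvIntOfChar r[n] else e) else e)
            ((n : Int) + 1) fuel := by
        simp only [pvLoop, if_pos hcond, hstep l s hnl, hstep r e hnr]
      set s' : Int := if s < 0 then (if PySem.Chars.isdigit l[n] then pvIntOfChar l[n] else s) else s with hs'
      set e' : Int := if e < 0 then (if PySem.Chars.isdigit r[n] then pvIntOfChar r[n] else e) else e with he'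
      rw [hrec]
      have hcast : ((n : Int) + 1) = ((n + 1 : Nat) : Int) := by push_cast; ring
      rw [hcast]
      have hsnew : s' < 0 → (List.drop (n + 1) l).any PySem.Chars.isdigit = true := by
        intro hlt
        have hs0 : s < 0 := by
          by_contra h0
          rw [hs', if_neg h0] at hlt
          exact h0 hlt
        have hnd : PySem.Chars.isdigit l[n] = false := by
          by_cases hd : PySem.Chars.isdigit l[n] = true
          · exfalso
            have hge := pvIntOfChar_nonneg l[n] hd
            rw [hs', if_pos hs0, if_pos hd] at hlt
            omega
          · simpa using hd
        have h1 := hs hs0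
        rw [hdl, List.any_cons, hnd] at h1
        simpa using h1
      have henew : e' < 0 → (List.drop (n + 1) r).any PySem.Chars.isdigit = true := by
        intro hlt
        have he0 : e < 0 := by
          by_contra h0
          rw [he', if_neg h0] at hlt
          exact h0 hlt
        have hnd : PySem.Chars.isdigit r[n] = false := by
          by_cases hd : PySem.Chars.isdigit r[n] = true
          · exfalso
            have hge := pvIntOfChar_nonneg r[n] hd
            rw [he', if_pos he0, if_pos hd] at hlt
            omega
          · simpa using hd
        have h1 := he he0
        rw [hdr, List.any_cons, hnd] at h1
        simpa using h1
      rw [ih (n + 1) s' e' (by omega) (by omega) hsnew henew]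
      have hX : (if s' < 0 then pvFirstDig (List.drop (n + 1) l) else s') =
          (if s < 0 then pvFirstDig (List.drop n l) else s) := by
        by_cases hs0 : s < 0
        · by_cases hd : PySem.Chars.isdigit l[n] = true
          · have hge := pvIntOfChar_nonneg l[n] hd
            rw [hs', if_pos hs0, if_pos hd, if_neg (by omega), if_pos hs0]
            simp only [pvFirstDig]
            rw [hdl, List.find?_cons_of_pos hd, Option.getD_some]
          · have hnd : PySem.Chars.isdigit l[n] = false := by simpa using hd
            rw [hs', if_pos hs0, hnd]
            simp only [Bool.false_eq_true, if_false, if_pos hs0]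
            simp only [pvFirstDig]
            rw [hdl, List.find?_cons_of_neg hd]
        · simp [hs', hs0]
      have hY : (if e' < 0 then pvFirstDig (List.drop (n + 1) r) else e') =
          (if e < 0 then pvFirstDig (List.drop n r) else e) := by
        by_cases he0 : e < 0
        · by_cases hd : PySem.Chars.isdigit r[n] = true
          · have hge := pvIntOfChar_nonneg r[n] hd
            rw [he', if_pos he0, if_pos hd, if_neg (by omega), if_pos he0]
            simp only [pvFirstDig]
            rw [hdr, List.find?_cons_of_pos hd, Option.getD_some]
          · have hnd : PySem.Chars.isdigit r[n] = false := by simpa using hd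
            rw [he', if_pos he0, hnd]
            simp only [Bool.false_eq_true, if_false, if_pos he0]
            simp only [pvFirstDig]
            rw [hdr, List.find?_cons_of_neg hd]
        · simp [he', he0]
      rw [hX, hY]
    · obtain ⟨h1, h2⟩ := not_or.mp hcond
      simp only [pvLoop, if_neg (by omega : ¬ (s < 0 ∨ e < 0))]
      rw [if_neg (by omega), if_neg (by omega)]

-- ===== VERDICT =====
theorem p1_parse_spec : Claim_equal_p1_parse := by
  intro i _ hpre
  unfold Spec_p1_parse p1_parse p1_parse_alt
  apply List.map_congr_left
  intro j hj
  have hany : j.toList.any PySem.Chars.isdigit = true := hpre j hj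
  set l := j.toList with hl
  -- A side: the reversed slice is l.reverse, then apply the loop characterisation
  have hrev : (PySem.List.slice? l none none (-1)).getD [] = l.reverse := by
    rw [PySem.List.slice?_none_none_neg_one]; rfl
  have hloop := pvLoop_eq l l.reverse (by simp) (l.length + 1) 0 (-1) (-1)
    (by omega) (by omega) (fun _ => by simpa using hany) (fun _ => by simpa using hany)
  norm_num at hloop
  -- B side: the digit list is nonempty
  have hne : l.filter PySem.Chars.isdigit ≠ [] := by
    intro hnil
    rw [List.filter_eq_nil_iff] at hnil
    rw [List.any_eq_true] at hany
    obtain ⟨c, hc, hcd⟩ := hany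
    exact absurd hcd (by simpa using hnil c hc)
  set ds := l.filter PySem.Chars.isdigit with hds
  have hhead : PySem.List.pyGet? ds 0 = some (ds.head hne) := by
    rw [PySem.List.pyGet?_zero, ← List.head?_eq_getElem?, List.head?_eq_some_head hne]
  have hlast : PySem.List.pyGet? ds (-1) = some (ds.getLast hne) := by
    rw [PySem.List.pyGet?_neg_one, List.getLast?_eq_some_getLast hne]
  simp only [hrev, hhead, hlast, hloop, Option.getD_some]
  have hdhead : PySem.Chars.isdigit (ds.head hne) = true :=
    List.of_mem_filter (List.head_mem hne)
  have hdlast : PySem.Chars.isdigit (ds.getLast hne) = true :=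
    List.of_mem_filter (List.getLast_mem hne)
  have hf1 : pvFirstDig l = pvIntOfChar (ds.head hne) := by
    rw [pvFirstDig, ← List.head?_filter, ← hds, List.head?_eq_some_head hne]; rfl
  have hf2 : pvFirstDig l.reverse = pvIntOfChar (ds.getLast hne) := by
    rw [pvFirstDig, ← List.head?_filter, List.filter_reverse, ← hds,
      ← List.getLast?_eq_head?_reverse, List.getLast?_eq_some_getLast hne]
    rfl
  rw [hf1, hf2, pvCombine _ _ hdhead hdlast]
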